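-- pv_equiv track=rewrite | github.com/JensGutow/AoC2021 | 2020/tag_06.py | solve_1_2
-- ===== SOURCE A (Python) =====
-- def solve_1_2(puzzle):
--     s_u = s_is = 0
--     for l_item in puzzle:
--         s_result_u = s_result_is =  l_item[0]
--         for s_item in l_item:
--             s_result_u = s_result_u.union(s_item)
--             s_result_is = s_result_is.intersection(s_item)
--         s_u += len(s_result_u)
--         s_is += len(s_result_is)
--     return s_u, s_is
-- ===== SOURCE B (Python) =====
-- def solve_1_2(puzzle):
--     s_u = s_is = 0
--     for group in puzzle:
--         counts = {}
--         for s in group: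
--             for x in s:
--                 counts[x] = counts.get(x, 0) + 1
--         s_u += len(counts)
--         n = len(group)
--         s_is += sum(1 for c in counts.values() if c == n)
--     return s_u, s_is
-- ===== Notes on version B (the rewrite author's own statement) =====
-- stated objective: alternative
-- what changed: Replaces the per-group chain of set.union/set.intersection calls (each building a fresh set) with one occurrence-count dictionary per group: the union size is the number of distinct keys and the intersection size is the number of keys whose count equals the number of sets in the group.
import Mathlib
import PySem

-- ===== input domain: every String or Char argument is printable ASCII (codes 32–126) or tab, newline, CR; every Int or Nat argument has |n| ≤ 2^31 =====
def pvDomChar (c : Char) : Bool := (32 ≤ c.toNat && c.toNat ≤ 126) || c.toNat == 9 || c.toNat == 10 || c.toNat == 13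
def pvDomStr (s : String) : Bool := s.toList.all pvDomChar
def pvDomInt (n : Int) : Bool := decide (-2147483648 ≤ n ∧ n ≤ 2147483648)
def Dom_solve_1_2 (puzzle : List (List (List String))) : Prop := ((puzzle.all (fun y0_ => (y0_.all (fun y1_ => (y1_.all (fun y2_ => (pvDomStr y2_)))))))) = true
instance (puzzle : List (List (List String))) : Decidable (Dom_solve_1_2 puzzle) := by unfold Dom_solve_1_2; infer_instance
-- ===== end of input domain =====

-- B replaces A's repeated set.union/set.intersection per group by one occurrence-count
-- dictionary per group (union size = number of keys, intersection size = keys counted in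
-- every set of the group); same results by a different mechanism.
-- Inner 'List String' values represent Python sets (distinct elements); both ports read
-- them through PySem.Set.ofList, the set conversion.

-- ===== PORT A =====
def solve_1_2 (puzzle : List (List (List String))) : Int × Int :=
  puzzle.foldl
    (fun acc l_item =>
      let g : List (PySem.Set String) := l_item.map (fun s => PySem.Set.ofList s)
      let init : PySem.Set String := PySem.List.pyGetD g 0 []
      let r := g.foldl
        (fun (p : PySem.Set String × PySem.Set String) s_item =>
          (PySem.Set.union p.1 s_item, PySem.Set.inter p.2 s_item))
        (init, init)
      (acc.1 + PySem.Set.len r.1, acc.2 + PySem.Set.len r.2))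
    (0, 0)

-- ===== PORT B =====
def solve_1_2_alt (puzzle : List (List (List String))) : Int × Int :=
  puzzle.foldl
    (fun acc group =>
      let counts : PySem.Dict String Int :=
        group.foldl
          (fun d s => (PySem.Set.ofList s).foldl (fun d x => d.insert x (d.getD x 0 + 1)) d)
          PySem.Dict.empty
      let n : Int := group.length
      (acc.1 + (PySem.Dict.size counts : Int),
       acc.2 + ((counts.values.filter (fun c => c == n)).length : Int)))
    (0, 0)

-- ===== PRECONDITION & SPEC =====
-- Pre_ excludes exactly the puzzles containing an empty group, on which A's 'l_item[0]' raises IndexError.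
def Pre_solve_1_2 (puzzle : List (List (List String))) : Prop :=
  ∀ g ∈ puzzle, g ≠ []
instance (puzzle : List (List (List String))) : Decidable (Pre_solve_1_2 puzzle) := by unfold Pre_solve_1_2; infer_instance
def pvWitness_solve_1_2 : List (List (List String)) := [[["a", "b"], ["b"]], [["c"]]]

def Spec_solve_1_2 (puzzle : List (List (List String))) (out : Int × Int) : Prop := out = solve_1_2_alt puzzle
instance (puzzle : List (List (List String))) (out : Int × Int) : Decidable (Spec_solve_1_2 puzzle out) := by unfold Spec_solve_1_2; infer_instance

-- ===== CLAIM (what is proved, stated in full; the proofs are below) =====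
def Claim_equal_solve_1_2 : Prop := ∀ (puzzle : List (List (List String))), Dom_solve_1_2 puzzle → Pre_solve_1_2 puzzle → Spec_solve_1_2 puzzle (solve_1_2 puzzle)

-- ===== LEMMAS AND PROOFS =====

theorem mem_foldl_union {x : String} (g : List (PySem.Set String)) (init : PySem.Set String) :
    x ∈ g.foldl PySem.Set.union init ↔ x ∈ init ∨ ∃ s ∈ g, x ∈ s := by
  induction g generalizing init with
  | nil => simp
  | cons s t ih => simp [ih, PySem.Set.mem_union, or_assoc]

theorem nodup_foldl_union (g : List (PySem.Set String)) (init : PySem.Set String)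
    (h : init.Nodup) : (g.foldl PySem.Set.union init).Nodup := by
  induction g generalizing init with
  | nil => exact h
  | cons s t ih => exact ih _ (PySem.Set.nodup_union _ _ h)

theorem mem_foldl_inter {x : String} (g : List (PySem.Set String)) (init : PySem.Set String) :
    x ∈ g.foldl PySem.Set.inter init ↔ x ∈ init ∧ ∀ s ∈ g, x ∈ s := by
  induction g generalizing init with
  | nil => simp
  | cons s t ih => simp [ih, PySem.Set.mem_inter, and_assoc]

theorem nodup_foldl_inter (g : List (PySem.Set String)) (init : PySem.Set String)
    (h : init.Nodup) : (g.foldl PySem.Set.inter init).Nodup := by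
  induction g generalizing init with
  | nil => exact h
  | cons s t ih => exact ih _ (PySem.Set.nodup_inter _ _ h)

theorem foldl_nested_eq_flatten {α β : Type} (g : List (List α)) (f : β → α → β) (d : β) :
    g.foldl (fun d s => s.foldl f d) d = g.flatten.foldl f d := by
  induction g generalizing d with
  | nil => rfl
  | cons s t ih => simp [List.flatten, List.foldl_append, ih]

-- count of x in the flattened group = number of sets of the group containing x
theorem count_flatten_eq_countP (x : String) (g : List (PySem.Set String))
    (hnd : ∀ s ∈ g, s.Nodup) :
    (g.flatten.count x) = g.countP (fun s => decide (x ∈ s)) := by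
  induction g with
  | nil => rfl
  | cons s t ih =>
    have hs : s.count x = if x ∈ s then 1 else 0 := by
      split_ifs with hx
      · exact List.count_eq_one_of_mem (hnd s (by simp)) hx
      · exact List.count_eq_zero_of_not_mem hx
    simp [List.countP_cons, hs, ih (fun s hs => hnd s (by simp [hs]))]
    split_ifs <;> (simp_all; try omega)

-- the per-group step of A equals the per-group step of B on a nonempty group
theorem group_step_eq (acc : Int × Int) (l : List (List String)) (h : l ≠ []) :
    (let g : List (PySem.Set String) := l.map (fun s => PySem.Set.ofList s)
     let init : PySem.Set String := PySem.List.pyGetD g 0 []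
     let r := g.foldl
        (fun (p : PySem.Set String × PySem.Set String) s_item =>
          (PySem.Set.union p.1 s_item, PySem.Set.inter p.2 s_item))
        (init, init)
     ((acc.1 + PySem.Set.len r.1, acc.2 + PySem.Set.len r.2) : Int × Int))
    =
    (let counts : PySem.Dict String Int :=
        l.foldl
          (fun d s => (PySem.Set.ofList s).foldl (fun d x => d.insert x (d.getD x 0 + 1)) d)
          PySem.Dict.empty
     let n : Int := l.length
     ((acc.1 + (PySem.Dict.size counts : Int),
       acc.2 + ((counts.values.filter (fun c => c == n)).length : Int)) : Int × Int)) := by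
  simp only [PySem.List.foldl_prod_mk]
  have hgne : l.map (fun s => PySem.Set.ofList s) ≠ [] := by
    simpa using h
  obtain ⟨a, t, hgat⟩ := List.exists_cons_of_ne_nil hgne
  have hamem : a ∈ l.map (fun s => PySem.Set.ofList s) := by rw [hgat]; exact List.mem_cons_self
  have hnd : ∀ s ∈ l.map (fun s => PySem.Set.ofList s), List.Nodup s := by
    intro s hs
    obtain ⟨w, -, rfl⟩ := List.mem_map.1 hs
    exact PySem.Set.nodup_ofList w
  have hand : List.Nodup a := hnd a hamem
  have hinit : PySem.List.pyGetD (l.map (fun s => PySem.Set.ofList s)) 0 [] = a := by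
    rw [hgat]; simp [PySem.List.pyGetD, PySem.List.pyGet?, PySem.List.pyIdx?]
  rw [hinit]
  -- B's dictionary is the counter of the flattened (deduplicated) group
  have hcounts :
      l.foldl (fun d s => (PySem.Set.ofList s).foldl
          (fun d x => d.insert x (d.getD x 0 + 1)) d) PySem.Dict.empty
        = PySem.Dict.counter ((l.map (fun s => PySem.Set.ofList s)).flatten) := by
    rw [← PySem.Dict.foldl_insert_getD_add_one_eq_counter, ← foldl_nested_eq_flatten,
      List.foldl_map]
  rw [hcounts]
  -- abbreviations
  have hEmem : ∀ x : String,
      (x ∈ (l.map (fun s => PySem.Set.ofList s)).flatten)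
        ↔ ∃ s ∈ l.map (fun s => PySem.Set.ofList s), x ∈ s := by
    intro x; exact List.mem_flatten
  -- union size
  have hUperm :
      ((l.map (fun s => PySem.Set.ofList s)).foldl PySem.Set.union a).Perm
        (PySem.Set.ofList ((l.map (fun s => PySem.Set.ofList s)).flatten)) := by
    rw [List.perm_ext_iff_of_nodup (nodup_foldl_union _ _ hand) (PySem.Set.nodup_ofList _)]
    intro x
    rw [mem_foldl_union, PySem.Set.mem_ofList, hEmem]
    constructor
    · rintro (hx | hx)
      · exact ⟨a, hamem, hx⟩
      · exact hx
    · exact Or.inr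
  -- intersection: same members as the keys counted l.length times
  have hIperm :
      ((l.map (fun s => PySem.Set.ofList s)).foldl PySem.Set.inter a).Perm
        ((PySem.Set.ofList ((l.map (fun s => PySem.Set.ofList s)).flatten)).filter
          (fun k => ((((l.map (fun s => PySem.Set.ofList s)).flatten).count k : Int) == (l.length : Int)))) := by
    rw [List.perm_ext_iff_of_nodup (nodup_foldl_inter _ _ hand)
      ((PySem.Set.nodup_ofList _).filter _)]
    intro x
    rw [mem_foldl_inter, List.mem_filter, PySem.Set.mem_ofList, hEmem]
    have hcnt : ((((l.map (fun s => PySem.Set.ofList s)).flatten).count x : Int) == (l.length : Int)) = true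
        ↔ ∀ s ∈ l.map (fun s => PySem.Set.ofList s), x ∈ s := by
      rw [beq_iff_eq, count_flatten_eq_countP x _ hnd]
      have : ((l.map (fun s => PySem.Set.ofList s)).countP (fun s => decide (x ∈ s)) : Int)
          = (l.length : Int) ↔ (l.map (fun s => PySem.Set.ofList s)).countP (fun s => decide (x ∈ s))
          = (l.map (fun s => PySem.Set.ofList s)).length := by
        rw [List.length_map]; omega
      rw [this, List.countP_eq_length]
      simp
    rw [hcnt]
    constructor
    · rintro ⟨hxa, hall⟩
      exact ⟨⟨a, hamem, hxa⟩, hall⟩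
    · rintro ⟨-, hall⟩
      exact ⟨hall a hamem, hall⟩
  -- put the two components together
  have hsize : (PySem.Dict.size (PySem.Dict.counter ((l.map (fun s => PySem.Set.ofList s)).flatten)) : Int)
      = PySem.Set.len ((l.map (fun s => PySem.Set.ofList s)).foldl PySem.Set.union a) := by
    simp [PySem.Dict.size, PySem.Dict.items_counter, PySem.Set.len, hUperm.length_eq]
  have hvals : ((((PySem.Dict.counter ((l.map (fun s => PySem.Set.ofList s)).flatten)).values).filter
        (fun c => c == (l.length : Int))).length : Int)
      = PySem.Set.len ((l.map (fun s => PySem.Set.ofList s)).foldl PySem.Set.inter a) := by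
    simp only [PySem.Dict.values, PySem.Dict.items_counter, List.map_map]
    rw [show ((fun p : String × Int => p.2) ∘ fun k => (k, (((l.map (fun s => PySem.Set.ofList s)).flatten).count k : Int)))
        = fun k => (((l.map (fun s => PySem.Set.ofList s)).flatten).count k : Int) from rfl]
    rw [List.filter_map, List.length_map]
    simp [PySem.Set.len, hIperm.length_eq, Function.comp_def]
  rw [hsize, hvals]

theorem foldl_congr_mem_pre {α β : Type} {l : List α} {f g : β → α → β}
    (h : ∀ x ∈ l, ∀ acc, f acc x = g acc x) :
    ∀ b, l.foldl f b = l.foldl g b := by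
  induction l with
  | nil => intro b; rfl
  | cons x t ih =>
    intro b
    simp only [List.foldl_cons]
    rw [h x List.mem_cons_self b]
    exact ih (fun y hy => h y (List.mem_cons_of_mem x hy)) _

theorem steps_eq (puzzle : List (List (List String))) (hpre : ∀ g ∈ puzzle, g ≠ []) :
    solve_1_2 puzzle = solve_1_2_alt puzzle := by
  unfold solve_1_2 solve_1_2_alt
  exact foldl_congr_mem_pre (fun x hx acc => group_step_eq acc x (hpre x hx)) (0, 0)

-- ===== VERDICT (by name: the statement is the Claim_ definition above) =====
theorem solve_1_2_spec : Claim_equal_solve_1_2 := by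
  intro puzzle _ hpre
  unfold Spec_solve_1_2
  exact steps_eq puzzle hpre
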